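-- pv_equiv track=rewrite | github.com/jryzhik/coursemore | back-end/scrapers/scripts/crtiqueScraper.py | reverse_name
-- ===== SOURCE A (Python) =====
-- def reverse_name(name):
--     name_to_list = name.split()
--     reverse_name_string = ""
--     middle_name = True if len(name_to_list) == 3 else False
--     while len(name_to_list) > 0:
--         if len(name_to_list) == 2 and middle_name:
--             reverse_name_string += name_to_list[0] + " "
--             name_to_list.remove(name_to_list[0])
--         if len(name_to_list) == 1:
--             reverse_name_string += name_to_list.pop()
--         else:
--             reverse_name_string += name_to_list.pop() + " "
--     return reverse_name_string
-- ===== SOURCE B (Python) =====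
-- def reverse_name(name):
--     words = name.split()
--     if len(words) == 3:
--         return words[2] + " " + words[0] + " " + words[1]
--     return " ".join(reversed(words))
-- ===== Notes on version B (the rewrite author's own statement) =====
-- stated objective: simpler
-- what changed: Replaces the destructive pop/remove while loop and running string accumulation with a single split plus a closed-form expression: one direct three-word citation case, otherwise a space-join of the reversed word list.
import Mathlib
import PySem

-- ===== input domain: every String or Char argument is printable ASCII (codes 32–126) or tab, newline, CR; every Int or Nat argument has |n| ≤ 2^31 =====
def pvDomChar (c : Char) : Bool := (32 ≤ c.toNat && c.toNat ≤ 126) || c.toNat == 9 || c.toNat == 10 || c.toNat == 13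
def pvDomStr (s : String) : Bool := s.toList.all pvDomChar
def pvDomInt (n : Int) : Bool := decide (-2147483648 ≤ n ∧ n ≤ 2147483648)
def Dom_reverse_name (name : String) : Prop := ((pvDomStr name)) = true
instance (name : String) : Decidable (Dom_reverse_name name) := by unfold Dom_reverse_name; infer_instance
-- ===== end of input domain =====

-- B replaces A's destructive pop/remove while loop with a single split and a closed-form
-- expression (3-word citation case, else a joined reversal); objective: simpler.


-- ===== PORT A =====
-- the while loop of A: state = (remaining word list, accumulated string, middle_name flag)
def reverseNameLoop (l : List String) (acc : String) (middle : Bool) : String :=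
  if _h : 0 < l.length then
    if _hc : l.length == 2 && middle then
      -- acc += l[0] + " "; remove first occurrence of l[0] (= index 0); then pop as below
      let l2 := l.drop 1
      let acc2 := acc ++ (PySem.List.pyGet? l 0).getD "" ++ " "
      if l2.length == 1 then reverseNameLoop l2.dropLast (acc2 ++ l2.getLastD "") middle
      else reverseNameLoop l2.dropLast (acc2 ++ l2.getLastD "" ++ " ") middle
    else
      -- pop the last element, with a trailing space unless it is the only one
      if l.length == 1 then reverseNameLoop l.dropLast (acc ++ l.getLastD "") middle
      else reverseNameLoop l.dropLast (acc ++ l.getLastD "" ++ " ") middle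
  else acc
termination_by l.length
decreasing_by all_goals (simp [List.length_dropLast]; omega)

def reverse_name (name : String) : String :=
  let nameToList := PySem.Str.split₀ name
  reverseNameLoop nameToList "" (nameToList.length == 3)

-- ===== PORT B =====
def reverse_name_alt (name : String) : String :=
  let words := PySem.Str.split₀ name
  if words.length == 3 then
    (PySem.List.pyGet? words 2).getD "" ++ " " ++ (PySem.List.pyGet? words 0).getD "" ++ " "
      ++ (PySem.List.pyGet? words 1).getD ""
  else
    PySem.Str.join " " words.reverse

-- ===== PRECONDITION & SPEC =====
def Spec_reverse_name (name : String) (out : String) : Prop := out = reverse_name_alt name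
instance (name : String) (out : String) : Decidable (Spec_reverse_name name out) := by unfold Spec_reverse_name; infer_instance

-- ===== CLAIM (what is proved, stated in full; the proofs are below) =====
def Claim_equal_reverse_name : Prop := ∀ (name : String), Dom_reverse_name name → Spec_reverse_name name (reverse_name name)

-- ===== LEMMAS AND PROOFS =====
lemma strOfList_append (a b : List Char) :
    String.ofList (a ++ b) = String.ofList a ++ String.ofList b := by simp

lemma join_cons_cons' (x y : String) (r : List String) :
    PySem.Str.join " " (x :: y :: r) = x ++ " " ++ PySem.Str.join " " (y :: r) := by
  simp only [PySem.Str.join, List.map_cons]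
  rw [show (" ".toList) = [' '] from rfl, PySem.Chars.join_cons_cons]
  rw [← List.singleton_append, strOfList_append, strOfList_append]
  simp [String.append_assoc]

lemma join_singleton' (x : String) : PySem.Str.join " " [x] = x := by
  simp [PySem.Str.join, PySem.Chars.join, List.intercalate]

lemma join_nil' : PySem.Str.join " " [] = "" := by
  simp [PySem.Str.join, PySem.Chars.join, List.intercalate]

lemma loop_no_middle (ws : List String) : ∀ acc,
    reverseNameLoop ws acc false = acc ++ PySem.Str.join " " ws.reverse := by
  induction ws using List.reverseRecOn with
  | nil =>
      intro acc
      rw [reverseNameLoop]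
      simp [join_nil']
  | append_singleton l x ih =>
      intro acc
      rw [reverseNameLoop]
      by_cases hl : l = []
      · subst hl
        rw [reverseNameLoop]
        simp [join_singleton']
      · have hlen1 : ¬ ((l ++ [x]).length == 1) = true := by
          simp only [List.length_append, List.length_cons, List.length_nil, beq_iff_eq]
          intro h
          exact hl (List.eq_nil_of_length_eq_zero (by omega))
        simp only [Bool.and_false, Bool.false_eq_true, dite_eq_ite, if_false,
          if_pos (by simp : 0 < (l ++ [x]).length), if_neg hlen1,
          List.dropLast_concat, List.getLastD_concat]
        rw [ih]
        obtain ⟨y, r, hr⟩ := List.exists_cons_of_ne_nil (by simpa using hl : l.reverse ≠ [])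
        rw [List.reverse_append, List.reverse_singleton, List.singleton_append, hr,
          join_cons_cons']
        simp [String.append_assoc]

lemma loop_three (a b c : String) :
    reverseNameLoop [a, b, c] "" true = c ++ " " ++ a ++ " " ++ b := by
  rw [reverseNameLoop]
  simp only [List.length_cons, List.length_nil]
  norm_num [PySem.List.pyGet?, PySem.List.pyIdx?]
  rw [reverseNameLoop]
  norm_num [PySem.List.pyGet?, PySem.List.pyIdx?]
  rw [reverseNameLoop]
  simp [String.append_assoc]

-- ===== VERDICT (by name: the statement is the Claim_ definition above) =====
theorem reverse_name_spec : Claim_equal_reverse_name := by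
  intro name _
  unfold Spec_reverse_name reverse_name reverse_name_alt
  generalize PySem.Str.split₀ name = ws
  by_cases h3 : ws.length = 3
  · match ws, h3 with
    | [a, b, c], _ =>
      simp only [List.length_cons, List.length_nil]
      norm_num [PySem.List.pyGet?, PySem.List.pyIdx?]
      exact loop_three a b c
  · have hb : (ws.length == 3) = false := by simp [h3]
    simp only [hb, Bool.false_eq_true, if_false]
    simpa using loop_no_middle ws ""
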